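-- pv_equiv track=rewrite | github.com/mgijax/femover | gather/annotation/transform.py | groupPropertiesByStanza
-- ===== SOURCE A (Python) =====
-- def groupPropertiesByStanza(properties):
--     """
--     Given properties as [{type, property, stanza, sequencenum, value},...]
--     return list of properties for each stanza as [[properties],[properties],...]
--     """
--     # ensure order by stanza
--     properties.sort(key=lambda x : x['stanza'])
--     stanzas = []
--     curStanza = 0
--     curPropsInStanza = []
--     for prop in properties:
--
--         if curPropsInStanza and curStanza != prop['stanza']:
--             stanzas.append(curPropsInStanza)
--             curPropsInStanza = []
--
--         curPropsInStanza.append(prop)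
--         curStanza = prop['stanza']
--
--     if curPropsInStanza:
--         stanzas.append(curPropsInStanza)
--
--     return stanzas
-- ===== SOURCE B (Python) =====
-- def groupPropertiesByStanza(properties):
--     """
--     Given properties as [{type, property, stanza, sequencenum, value},...]
--     return list of properties for each stanza as [[properties],[properties],...]
--     """
--     # ensure order by stanza (in-place, same side effect as before)
--     properties.sort(key=lambda x: x['stanza'])
--     groups = {}
--     for prop in properties:
--         groups.setdefault(prop['stanza'], []).append(prop)
--     return list(groups.values())
-- ===== Notes on version B (the rewrite author's own statement) =====
-- stated objective: idiomatic
-- what changed: Replaces the running-sublist/boundary-change branch with a single setdefault-grouping dict over the pre-sorted list, returning its values; the result comes out in ascending stanza order because the list was sorted first.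
import Mathlib
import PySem

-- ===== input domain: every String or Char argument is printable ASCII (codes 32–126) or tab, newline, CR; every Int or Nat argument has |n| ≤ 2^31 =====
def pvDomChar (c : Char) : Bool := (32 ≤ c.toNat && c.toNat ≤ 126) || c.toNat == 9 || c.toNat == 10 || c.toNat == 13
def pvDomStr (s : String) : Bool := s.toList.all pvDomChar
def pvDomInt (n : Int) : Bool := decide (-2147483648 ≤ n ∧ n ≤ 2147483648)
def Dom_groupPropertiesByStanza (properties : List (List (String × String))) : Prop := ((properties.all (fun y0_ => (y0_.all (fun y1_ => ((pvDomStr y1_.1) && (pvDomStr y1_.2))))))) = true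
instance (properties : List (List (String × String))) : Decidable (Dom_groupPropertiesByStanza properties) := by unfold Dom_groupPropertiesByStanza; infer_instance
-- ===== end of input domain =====

-- B groups the pre-sorted properties with a stanza-keyed dict instead of A's running-sublist /
-- boundary-change branch; return values proved equal (Python A and B both sort `properties` in place).

-- shared helper: prop['stanza'] — first-match association-list lookup (Pre_ guarantees the key is
-- present, so the "" default is never reached)
def pvStanzaOf (d : List (String × String)) : String :=
  (((d.find? (fun p => p.1 == "stanza")).map Prod.snd).getD "")

-- ===== PORT A =====
def groupPropertiesByStanza (properties : List (List (String × String))) : List (List (List (String × String))) :=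
  -- properties.sort(key=lambda x: x['stanza'])
  let props := PySem.List.sorted properties pvStanzaOf false
  -- curStanza starts as the Python int 0; it is only compared when curPropsInStanza is nonempty,
  -- by which point it has been overwritten by a string, so "" is a faithful initial value.
  let st := props.foldl
    (fun (st : List (List (List (String × String))) × String × List (List (String × String))) prop =>
      let stanzas := st.1
      let curStanza := st.2.1
      let cur := st.2.2
      let (stanzas, cur) :=
        if cur ≠ [] ∧ curStanza ≠ pvStanzaOf prop then
          (stanzas ++ [cur], ([] : List (List (String × String))))
        else (stanzas, cur)
      (stanzas, pvStanzaOf prop, cur ++ [prop]))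
    ([], "", [])
  if st.2.2 ≠ [] then st.1 ++ [st.2.2] else st.1

-- ===== PORT B =====
def groupPropertiesByStanza_alt (properties : List (List (String × String))) : List (List (List (String × String))) :=
  -- properties.sort(key=lambda x: x['stanza'])
  let props := PySem.List.sorted properties pvStanzaOf false
  -- for prop in props: groups.setdefault(prop['stanza'], []).append(prop)
  let groups : PySem.Dict String (List (List (String × String))) :=
    props.foldl (fun g prop => g.modify (pvStanzaOf prop) [] (fun v => v ++ [prop])) PySem.Dict.empty
  -- list(groups.values())
  groups.values

-- ===== PRECONDITION & SPEC =====
-- Pre_: every property dict carries the 'stanza' key; otherwise the Python A (and B) raise KeyError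
-- in the sort key.
def Pre_groupPropertiesByStanza (properties : List (List (String × String))) : Prop :=
  (properties.all (fun d => d.any (fun p => p.1 == "stanza"))) = true
instance (properties : List (List (String × String))) : Decidable (Pre_groupPropertiesByStanza properties) := by
  unfold Pre_groupPropertiesByStanza; infer_instance

def pvWitness_groupPropertiesByStanza : (List (List (String × String))) :=
  [[("stanza", "2"), ("value", "b")], [("stanza", "1"), ("value", "a")], [("stanza", "2"), ("value", "c")]]

def Spec_groupPropertiesByStanza (properties : List (List (String × String))) (out : List (List (List (String × String)))) : Prop := out = groupPropertiesByStanza_alt properties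
instance (properties : List (List (String × String))) (out : List (List (List (String × String)))) : Decidable (Spec_groupPropertiesByStanza properties out) := by unfold Spec_groupPropertiesByStanza; infer_instance

-- ===== CLAIM (what is proved, stated in full; the proofs are below) =====
def Claim_equal_groupPropertiesByStanza : Prop := ∀ (properties : List (List (String × String))), Dom_groupPropertiesByStanza properties → Pre_groupPropertiesByStanza properties → Spec_groupPropertiesByStanza properties (groupPropertiesByStanza properties)

-- ===== LEMMAS AND PROOFS =====

-- the common characterisation both ports are reduced to: the distinct stanza keys in
-- first-occurrence order, each mapped to the sublist of properties with that key
def pvBspec (l : List (List (String × String))) : List (List (List (String × String))) :=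
  (PySem.Set.ofList (l.map pvStanzaOf)).map (fun k => l.filter (fun p => pvStanzaOf p == k))

-- B's dict fold produces exactly pvBspec
theorem pvB_eq (l : List (List (String × String))) :
    (l.foldl (fun g prop => g.modify (pvStanzaOf prop) [] (fun v => v ++ [prop]))
      (PySem.Dict.empty : PySem.Dict String (List (List (String × String))))).values = pvBspec l := by
  set D := l.foldl (fun (g : PySem.Dict String (List (List (String × String)))) prop =>
      g.modify (pvStanzaOf prop) [] (fun v => v ++ [prop])) PySem.Dict.empty with hD
  have hnd : D.keys.Nodup := by
    rw [hD]
    exact PySem.Dict.nodup_keys_foldl_modify_key l pvStanzaOf [] (fun g prop => (fun v => v ++ [prop])) _ PySem.Dict.nodup_keys_empty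
  have hkeys : D.keys = PySem.Set.ofList (l.map pvStanzaOf) := by
    rw [hD, PySem.Dict.keys_foldl_modify_key]
    simp [PySem.Dict.keys_empty, PySem.Set.update_nil_left]
  have hget : ∀ c, D.getD c [] = l.filter (fun p => pvStanzaOf p == c) := by
    intro c
    rw [hD]
    have h1 : l.foldl (fun (g : PySem.Dict String (List (List (String × String)))) prop =>
        g.modify (pvStanzaOf prop) [] (fun v => v ++ [prop])) PySem.Dict.empty
        = (l.map (fun p => (pvStanzaOf p, p))).foldl (fun g pr => g.modify pr.1 [] (fun v => v ++ [pr.2])) PySem.Dict.empty := by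
      rw [List.foldl_map]
    rw [h1, PySem.Dict.getD_foldl_modify_append]
    simp only [List.filter_map]
    rw [List.map_map]
    simp [Function.comp_def]
  have := PySem.Dict.values_eq_map_keys D hnd ([] : List (List (String × String)))
  rw [this, hkeys, pvBspec]
  exact List.map_congr_left (fun k _ => hget k)

-- every key in a key-sorted l is ≤ the key of l's last element
theorem pv_le_last (l : List (List (String × String))) (z : List (String × String))
    (hs : l.Pairwise (fun a b => pvStanzaOf a ≤ pvStanzaOf b)) (hz : l.getLast? = some z)
    (q : List (String × String)) (hq : q ∈ l) : pvStanzaOf q ≤ pvStanzaOf z := by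
  have hne : l ≠ [] := by rintro rfl; simp at hz
  have hzl : l.getLast hne = z := (List.getLast_eq_iff_getLast?_eq_some hne).mpr hz
  have hdec : l.dropLast ++ [z] = l := by rw [← hzl]; exact List.dropLast_append_getLast hne
  rw [← hdec] at hs hq
  rw [List.pairwise_append] at hs
  rcases List.mem_append.mp hq with h | h
  · exact hs.2.2 q h z (by simp)
  · simp at h; subst h; exact le_refl _

-- the last distinct key is the key of the last element, for a key-sorted l
theorem pv_set_getLast (l : List (List (String × String)))
    (hs : l.Pairwise (fun a b => pvStanzaOf a ≤ pvStanzaOf b)) :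
    (PySem.Set.ofList (l.map pvStanzaOf)).getLast? = l.getLast?.map pvStanzaOf := by
  induction l using List.reverseRecOn with
  | nil => simp [PySem.Set.ofList_nil]
  | append_singleton l p ih =>
    have hs' : l.Pairwise (fun a b => pvStanzaOf a ≤ pvStanzaOf b) :=
      (List.pairwise_append.mp hs).1
    rw [List.map_append, List.map_singleton, PySem.Set.ofList_append_singleton]
    by_cases hmem : pvStanzaOf p ∈ PySem.Set.ofList (l.map pvStanzaOf)
    · rw [PySem.Set.add_of_mem hmem, ih hs']
      have hmem' : pvStanzaOf p ∈ l.map pvStanzaOf := (PySem.Set.mem_ofList _ _).mp hmem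
      obtain ⟨q, hq, hkq⟩ := List.mem_map.mp hmem'
      have hlne : l ≠ [] := by rintro rfl; simp at hq
      obtain ⟨z, hz⟩ := List.getLast?_isSome.mpr hlne |> Option.isSome_iff_exists.mp
      have h1 : pvStanzaOf q ≤ pvStanzaOf z := pv_le_last l z hs' hz q hq
      have h2 : pvStanzaOf z ≤ pvStanzaOf p := by
        have hzmem : z ∈ l := List.mem_of_getLast? hz
        exact (List.pairwise_append.mp hs).2.2 z hzmem p (by simp)
      have : pvStanzaOf z = pvStanzaOf p := le_antisymm h2 (hkq ▸ h1)
      rw [hz, List.getLast?_concat]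
      simp [this]
    · rw [PySem.Set.add_of_not_mem hmem]
      simp

theorem pv_dropLast_append {α : Type} (xs : List α) (a : α) (h : xs.getLast? = some a) :
    xs.dropLast ++ [a] = xs := by
  have hne : xs ≠ [] := by rintro rfl; simp at h
  have : xs.getLast hne = a := (List.getLast_eq_iff_getLast?_eq_some hne).mpr h
  rw [← this]; exact List.dropLast_append_getLast hne

theorem pv_ne_of_mem_dropLast {α : Type} (xs : List α) (a b : α) (hnd : xs.Nodup)
    (ha : xs.getLast? = some a) (hb : b ∈ xs.dropLast) : b ≠ a := by
  have hdec := pv_dropLast_append xs a ha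
  rw [← hdec] at hnd
  intro h
  subst h
  simp [List.nodup_append] at hnd
  exact hnd.2 b hb rfl

-- the last group of pvBspec is the run of the last element's key
theorem pvBspec_getLast (l : List (List (String × String))) (z : List (String × String))
    (hs : l.Pairwise (fun a b => pvStanzaOf a ≤ pvStanzaOf b)) (hz : l.getLast? = some z) :
    (pvBspec l).getLast? = some (l.filter (fun q => pvStanzaOf q == pvStanzaOf z)) := by
  unfold pvBspec
  rw [List.getLast?_map, pv_set_getLast l hs, hz]
  rfl

-- A's loop, run on a key-sorted list, ends with the grouped prefix, the last element's key, and the last run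
theorem pvA_fold (l : List (List (String × String))) (z : List (String × String))
    (hs : l.Pairwise (fun a b => pvStanzaOf a ≤ pvStanzaOf b)) (hz : l.getLast? = some z) :
    l.foldl
      (fun (st : List (List (List (String × String))) × String × List (List (String × String))) prop =>
        let stanzas := st.1
        let curStanza := st.2.1
        let cur := st.2.2
        let (stanzas, cur) :=
          if cur ≠ [] ∧ curStanza ≠ pvStanzaOf prop then
            (stanzas ++ [cur], ([] : List (List (String × String))))
          else (stanzas, cur)
        (stanzas, pvStanzaOf prop, cur ++ [prop]))
      ([], "", [])
    = ((pvBspec l).dropLast, pvStanzaOf z, l.filter (fun p => pvStanzaOf p == pvStanzaOf z)) := by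
  induction l using List.reverseRecOn generalizing z with
  | nil => simp at hz
  | append_singleton l p ih =>
    have hzp : p = z := by simpa using hz
    subst hzp
    have hs' : l.Pairwise (fun a b => pvStanzaOf a ≤ pvStanzaOf b) :=
      (List.pairwise_append.mp hs).1
    rcases eq_or_ne l [] with rfl | hlne
    · simp [pvBspec, PySem.Set.ofList_cons, PySem.Set.ofList_nil, PySem.Set.discard]
    · obtain ⟨z', hz'⟩ := Option.isSome_iff_exists.mp (List.getLast?_isSome.mpr hlne)
      have hz'mem : z' ∈ l := List.mem_of_getLast? hz'
      rw [List.foldl_append, ih z' hs' hz', List.foldl_cons, List.foldl_nil]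
      dsimp only
      have hcur_ne : l.filter (fun q => pvStanzaOf q == pvStanzaOf z') ≠ [] := by
        intro hnil
        have : z' ∈ l.filter (fun q => pvStanzaOf q == pvStanzaOf z') :=
          List.mem_filter.mpr ⟨hz'mem, by simp⟩
        rw [hnil] at this; simp at this
      have hS_last : (PySem.Set.ofList (l.map pvStanzaOf)).getLast? = some (pvStanzaOf z') := by
        rw [pv_set_getLast l hs', hz']; rfl
      have hSnd : (PySem.Set.ofList (l.map pvStanzaOf)).Nodup := PySem.Set.nodup_ofList _
      by_cases hkey : pvStanzaOf p = pvStanzaOf z'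
      · -- same stanza as the running sublist: no flush
        rw [if_neg (fun h => h.2 hkey.symm)]
        dsimp only
        have e1 : (pvBspec (l ++ [p])).dropLast = (pvBspec l).dropLast := by
          unfold pvBspec
          rw [List.map_append, List.map_singleton, PySem.Set.ofList_append_singleton,
            PySem.Set.add_of_mem (by
              rw [hkey]; exact (PySem.Set.mem_ofList _ _).mpr (List.mem_map.mpr ⟨z', hz'mem, rfl⟩))]
          rw [← List.map_dropLast, ← List.map_dropLast]
          apply List.map_congr_left
          intro k hk
          have hkne : k ≠ pvStanzaOf z' :=
            pv_ne_of_mem_dropLast _ _ _ hSnd hS_last hk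
          have hne2 : (pvStanzaOf p == k) = false :=
            beq_eq_false_iff_ne.mpr (by rw [hkey]; exact fun h => hkne h.symm)
          rw [List.filter_append]
          simp [hne2]
        have e3 : (l ++ [p]).filter (fun q => pvStanzaOf q == pvStanzaOf p)
            = l.filter (fun q => pvStanzaOf q == pvStanzaOf z') ++ [p] := by
          rw [List.filter_append]
          have hfun : (fun q => pvStanzaOf q == pvStanzaOf p) = (fun q => pvStanzaOf q == pvStanzaOf z') := by
            funext q; rw [hkey]
          rw [hfun]
          simp [hkey]
        rw [e1, e3]
      · -- new stanza: flush the running sublist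
        rw [if_pos ⟨hcur_ne, fun h => hkey h.symm⟩]
        dsimp only
        have hfresh : pvStanzaOf p ∉ l.map pvStanzaOf := by
          intro hmem
          obtain ⟨q, hq, hkq⟩ := List.mem_map.mp hmem
          have h1 : pvStanzaOf q ≤ pvStanzaOf z' := pv_le_last l z' hs' hz' q hq
          have h2 : pvStanzaOf z' ≤ pvStanzaOf p :=
            (List.pairwise_append.mp hs).2.2 z' hz'mem p (by simp)
          exact hkey ((le_antisymm h2 (hkq ▸ h1)).symm)
        have hfilp : l.filter (fun q => pvStanzaOf q == pvStanzaOf p) = [] := by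
          rw [List.filter_eq_nil_iff]
          intro q hq hbeq
          exact hfresh (List.mem_map.mpr ⟨q, hq, (eq_of_beq hbeq)⟩)
        have hBspec_app : pvBspec (l ++ [p]) = pvBspec l ++ [[p]] := by
          unfold pvBspec
          rw [List.map_append, List.map_singleton, PySem.Set.ofList_append_singleton,
            PySem.Set.add_of_not_mem (fun h => hfresh ((PySem.Set.mem_ofList _ _).mp h)),
            List.map_append, List.map_singleton]
          congr 1
          · apply List.map_congr_left
            intro k hk
            have hkne : (pvStanzaOf p == k) = false :=
              beq_eq_false_iff_ne.mpr (fun h => hfresh (h ▸ ((PySem.Set.mem_ofList _ _).mp hk)))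
            rw [List.filter_append]
            simp [hkne]
          · rw [List.filter_append, hfilp]
            simp
        have e1 : (pvBspec (l ++ [p])).dropLast
            = (pvBspec l).dropLast ++ [l.filter (fun q => pvStanzaOf q == pvStanzaOf z')] := by
          rw [hBspec_app, List.dropLast_concat]
          exact (pv_dropLast_append _ _ (pvBspec_getLast l z' hs' hz')).symm
        have e3 : (l ++ [p]).filter (fun q => pvStanzaOf q == pvStanzaOf p) = [] ++ [p] := by
          rw [List.filter_append, hfilp]
          simp
        rw [e1, e3]

-- ===== VERDICT (by name: the statement is the Claim_ definition above) =====
theorem groupPropertiesByStanza_spec : Claim_equal_groupPropertiesByStanza := by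
  intro properties _ _
  unfold Spec_groupPropertiesByStanza groupPropertiesByStanza groupPropertiesByStanza_alt
  dsimp only
  rw [pvB_eq]
  set l := PySem.List.sorted properties pvStanzaOf false with hl
  have hs : l.Pairwise (fun a b => pvStanzaOf a ≤ pvStanzaOf b) :=
    PySem.List.sorted_pairwise properties pvStanzaOf
  rcases eq_or_ne l [] with hnil | hlne
  · rw [hnil]
    simp [pvBspec, PySem.Set.ofList_nil]
  · obtain ⟨z, hz⟩ := Option.isSome_iff_exists.mp (List.getLast?_isSome.mpr hlne)
    rw [pvA_fold l z hs hz]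
    dsimp only
    have hcur_ne : l.filter (fun q => pvStanzaOf q == pvStanzaOf z) ≠ [] := by
      intro hnil
      have : z ∈ l.filter (fun q => pvStanzaOf q == pvStanzaOf z) :=
        List.mem_filter.mpr ⟨List.mem_of_getLast? hz, by simp⟩
      rw [hnil] at this; simp at this
    rw [if_pos hcur_ne]
    exact pv_dropLast_append _ _ (pvBspec_getLast l z hs hz)
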